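-- pv_equiv track=rewrite | github.com/ikemnkur/Python | hw1_BFS.py | check_adjacency_lists
-- ===== SOURCE A (Python) =====
-- def check_adjacency_lists(list1, list2):
--     if len(list1) != len(list2):
--         return False
--
--     for node in list1:
--         if node not in list2:
--             return False
--         if set(list1[node]) != set(list2[node]):
--             return False
--
--     return True
-- ===== SOURCE B (Python) =====
-- def check_adjacency_lists(list1, list2):
--     def canon(adj):
--         return sorted(((node, sorted(set(nbrs))) for node, nbrs in adj.items()),
--                       key=lambda item: item[0])
--     return canon(list1) == canon(list2)
-- ===== Notes on version B (the rewrite author's own statement) =====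
-- stated objective: alternative
-- what changed: Replaces A's per-node dict lookups (length check, key membership, per-key set comparison with early exit) by a sort-based canonicalization: each graph is turned into a key-sorted list of (node, sorted-deduplicated neighbors) pairs and the two canonical lists are compared once; no membership test or lookup into the other dict ever happens.
import Mathlib
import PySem

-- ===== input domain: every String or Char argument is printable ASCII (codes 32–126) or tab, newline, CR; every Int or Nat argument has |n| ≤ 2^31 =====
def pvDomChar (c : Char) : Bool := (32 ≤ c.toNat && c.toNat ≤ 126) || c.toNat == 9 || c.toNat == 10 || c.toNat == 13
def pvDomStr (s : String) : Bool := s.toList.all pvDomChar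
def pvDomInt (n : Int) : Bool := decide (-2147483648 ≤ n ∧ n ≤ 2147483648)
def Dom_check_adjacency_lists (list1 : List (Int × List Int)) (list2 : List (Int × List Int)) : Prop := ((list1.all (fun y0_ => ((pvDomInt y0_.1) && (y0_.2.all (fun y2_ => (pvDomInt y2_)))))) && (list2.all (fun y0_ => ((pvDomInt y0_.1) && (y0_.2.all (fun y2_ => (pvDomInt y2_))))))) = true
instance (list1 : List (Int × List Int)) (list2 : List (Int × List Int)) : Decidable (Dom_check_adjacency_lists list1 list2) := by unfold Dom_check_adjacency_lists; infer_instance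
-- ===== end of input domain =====

-- B canonicalizes each graph to a key-sorted list of (node, sorted deduped neighbors) pairs and
-- compares the two canonical lists once, instead of A's per-node dict-lookup loop; objective: alternative.


-- ===== PORT A =====
-- the 'for node in list1:' loop, over the keys of list1 in order, with early returns
def pvALoop (d1 d2 : PySem.Dict Int (List Int)) : List Int → Bool
  | [] => true
  | node :: rest =>
    if ¬ d2.contains node then false
    else if ¬ PySem.Set.equal (PySem.Set.ofList (d1.getD node [])) (PySem.Set.ofList (d2.getD node [])) then false
    else pvALoop d1 d2 rest

def check_adjacency_lists (list1 : List (Int × List Int)) (list2 : List (Int × List Int)) : Bool :=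
  if list1.length ≠ list2.length then false
  else pvALoop (PySem.Dict.mk list1) (PySem.Dict.mk list2) (list1.map Prod.fst)

-- ===== PORT B =====
-- sorted(set(nbrs)) : the neighbors as a strictly increasing list
def pvCanonNbrs (v : List Int) : List Int :=
  PySem.List.sorted (PySem.Set.ofList v) (fun x => x) false

-- canon(adj) = sorted(((node, sorted(set(nbrs))) for node, nbrs in adj.items()), key=lambda item: item[0])
def pvCanon (l : List (Int × List Int)) : List (Int × List Int) :=
  PySem.List.sorted (l.map (fun p => (p.1, pvCanonNbrs p.2))) (fun item => item.1) false

def check_adjacency_lists_alt (list1 : List (Int × List Int)) (list2 : List (Int × List Int)) : Bool :=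
  pvCanon list1 == pvCanon list2

-- ===== PRECONDITION & SPEC =====
-- Pre_ excludes association lists with duplicate keys: those do not represent a Python dict
-- (a dict cannot hold a key twice), so A is never run on them; it excludes no input A returns on.
def Pre_check_adjacency_lists (list1 : List (Int × List Int)) (list2 : List (Int × List Int)) : Prop :=
  (list1.map Prod.fst).Nodup ∧ (list2.map Prod.fst).Nodup
instance (list1 : List (Int × List Int)) (list2 : List (Int × List Int)) : Decidable (Pre_check_adjacency_lists list1 list2) := by unfold Pre_check_adjacency_lists; infer_instance

def pvWitness_check_adjacency_lists : (List (Int × List Int)) × (List (Int × List Int)) :=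
  ([(1, [2, 3]), (2, [1])], [(2, [1]), (1, [3, 2])])

def Spec_check_adjacency_lists (list1 : List (Int × List Int)) (list2 : List (Int × List Int)) (out : Bool) : Prop := out = check_adjacency_lists_alt list1 list2
instance (list1 : List (Int × List Int)) (list2 : List (Int × List Int)) (out : Bool) : Decidable (Spec_check_adjacency_lists list1 list2 out) := by unfold Spec_check_adjacency_lists; infer_instance

-- ===== CLAIM (what is proved, stated in full; the proofs are below) =====
def Claim_equal_check_adjacency_lists : Prop := ∀ (list1 : List (Int × List Int)) (list2 : List (Int × List Int)), Dom_check_adjacency_lists list1 list2 → Pre_check_adjacency_lists list1 list2 → Spec_check_adjacency_lists list1 list2 (check_adjacency_lists list1 list2)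

-- ===== LEMMAS AND PROOFS =====

-- A's early-return loop is an 'all' over the keys
theorem pvALoop_eq_all (d1 d2 : PySem.Dict Int (List Int)) (ks : List Int) :
    pvALoop d1 d2 ks = ks.all (fun node =>
      d2.contains node &&
        PySem.Set.equal (PySem.Set.ofList (d1.getD node [])) (PySem.Set.ofList (d2.getD node []))) := by
  induction ks with
  | nil => rfl
  | cons k rest ih =>
    simp only [pvALoop, List.all_cons, ih]
    by_cases h1 : d2.contains k = true <;> by_cases h2 :
        PySem.Set.equal (PySem.Set.ofList (d1.getD k [])) (PySem.Set.ofList (d2.getD k [])) = true <;>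
      simp [h1, h2]

-- canonical neighbor lists are equal exactly when the Python sets are
theorem pvCanonNbrs_eq_iff (v w : List Int) :
    pvCanonNbrs v = pvCanonNbrs w ↔ PySem.Set.equal (PySem.Set.ofList v) (PySem.Set.ofList w) = true := by
  constructor
  · intro h
    rw [PySem.Set.equal_iff]
    intro x
    have hv : x ∈ pvCanonNbrs v ↔ x ∈ v := by
      simp [pvCanonNbrs, PySem.List.mem_sorted, PySem.Set.mem_ofList]
    have hw : x ∈ pvCanonNbrs w ↔ x ∈ w := by
      simp [pvCanonNbrs, PySem.List.mem_sorted, PySem.Set.mem_ofList]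
    simp only [PySem.Set.mem_ofList, ← hv, ← hw, h]
  · intro h
    have hperm : (PySem.Set.ofList v).Perm (PySem.Set.ofList w) := by
      rw [List.perm_ext_iff_of_nodup (PySem.Set.nodup_ofList _) (PySem.Set.nodup_ofList _)]
      intro x
      exact (PySem.Set.equal_iff _ _).1 h x
    exact PySem.List.sorted_eq_sorted_of_perm _ _ _ (fun a b hab => hab) hperm

theorem pvCanonNbrs_mem_map {l : List (Int × List Int)} {p : Int × List Int}
    (hp : p ∈ l.map (fun q => (q.1, pvCanonNbrs q.2))) :
    ∃ w, (p.1, w) ∈ l ∧ p.2 = pvCanonNbrs w := by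
  rcases List.mem_map.1 hp with ⟨q, hq, rfl⟩
  exact ⟨q.2, hq, rfl⟩

-- a key-strictly-sorted list is canonical: two Perm lists both Pairwise (·.1 < ·.1) are equal
theorem pv_eq_of_perm_of_pairwise_lt {l1 l2 : List (Int × List Int)}
    (hp : l1.Perm l2) (h1 : l1.Pairwise (fun a b => a.1 < b.1))
    (h2 : l2.Pairwise (fun a b => a.1 < b.1)) : l1 = l2 := by
  exact List.Perm.eq_of_pairwise
    (fun a b _ _ hab hba => absurd (lt_trans hab hba) (lt_irrefl _)) h1 h2 hp

-- pvCanon l is key-strictly-sorted when l's keys are Nodup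
theorem pvCanon_pairwise (l : List (Int × List Int)) (h : (l.map Prod.fst).Nodup) :
    (pvCanon l).Pairwise (fun a b => a.1 < b.1) := by
  have hle := PySem.List.sorted_pairwise (xs := l.map (fun p => (p.1, pvCanonNbrs p.2)))
    (key := fun item => item.1)
  have hnd : ((pvCanon l).map Prod.fst).Nodup := by
    have hperm : (pvCanon l).Perm (l.map (fun p => (p.1, pvCanonNbrs p.2))) :=
      PySem.List.sorted_perm _ _ _
    have : ((l.map (fun p => (p.1, pvCanonNbrs p.2))).map Prod.fst).Nodup := by
      simpa [List.map_map, Function.comp] using h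
    exact (hperm.map Prod.fst).nodup_iff.2 this
  have hnd' : (pvCanon l).Pairwise (fun a b => a.1 ≠ b.1) := by
    simpa [List.pairwise_map] using List.Pairwise.imp (fun h => h) (List.nodup_iff_pairwise_ne.1 hnd)
  exact (hle.and hnd').imp (fun ⟨hab, hne⟩ => lt_of_le_of_ne hab hne)

-- the membership characterization of A's success, under Nodup keys
theorem pvCanon_eq_iff (l1 l2 : List (Int × List Int))
    (h1 : (l1.map Prod.fst).Nodup) (h2 : (l2.map Prod.fst).Nodup) :
    pvCanon l1 = pvCanon l2 ↔
      (l1.map (fun p => (p.1, pvCanonNbrs p.2))).Perm (l2.map (fun p => (p.1, pvCanonNbrs p.2))) := by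
  constructor
  · intro h
    have p1 : (pvCanon l1).Perm (l1.map (fun p => (p.1, pvCanonNbrs p.2))) :=
      PySem.List.sorted_perm _ _ _
    have p2 : (pvCanon l2).Perm (l2.map (fun p => (p.1, pvCanonNbrs p.2))) :=
      PySem.List.sorted_perm _ _ _
    exact p1.symm.trans (h ▸ p2)
  · intro hperm
    apply pv_eq_of_perm_of_pairwise_lt _ (pvCanon_pairwise l1 h1) (pvCanon_pairwise l2 h2)
    exact (PySem.List.sorted_perm _ _ _).trans (hperm.trans (PySem.List.sorted_perm _ _ _).symm)

-- ===== VERDICT (by name: the statement is the Claim_ definition above) =====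
theorem check_adjacency_lists_spec : Claim_equal_check_adjacency_lists := by
  intro l1 l2 _ hpre
  obtain ⟨h1, h2⟩ := hpre
  unfold Spec_check_adjacency_lists check_adjacency_lists check_adjacency_lists_alt
  rw [Bool.eq_iff_iff, beq_iff_eq]
  have hitems1 : (PySem.Dict.mk l1).items = l1 := rfl
  have hitems2 : (PySem.Dict.mk l2).items = l2 := rfl
  set m1 := l1.map (fun p => (p.1, pvCanonNbrs p.2)) with hm1
  set m2 := l2.map (fun p => (p.1, pvCanonNbrs p.2)) with hm2
  by_cases hlen : l1.length = l2.length
  · rw [if_neg (by simpa using hlen), pvALoop_eq_all, List.all_eq_true,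
      pvCanon_eq_iff l1 l2 h1 h2]
    constructor
    · -- loop succeeds ⇒ the mapped lists are a Perm
      intro hA
      have hsub : m1 ⊆ m2 := by
        intro p hp
        rcases pvCanonNbrs_mem_map hp with ⟨v, hkv, hpv⟩
        have hall := hA p.1 (List.mem_map.2 ⟨(p.1, v), hkv, rfl⟩)
        have hc : (PySem.Dict.mk l2).contains p.1 = true := by
          cases hcc : (PySem.Dict.mk l2).contains p.1 <;> simp_all
        have heq : PySem.Set.equal (PySem.Set.ofList ((PySem.Dict.mk l1).getD p.1 []))
            (PySem.Set.ofList ((PySem.Dict.mk l2).getD p.1 [])) = true := by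
          cases hee : PySem.Set.equal (PySem.Set.ofList ((PySem.Dict.mk l1).getD p.1 []))
              (PySem.Set.ofList ((PySem.Dict.mk l2).getD p.1 [])) <;> simp_all
        have hget1 : (PySem.Dict.mk l1).getD p.1 [] = v :=
          PySem.Dict.getD_of_mem_items (PySem.Dict.mk l1)
            (show (p.1, v) ∈ (PySem.Dict.mk l1).items from hkv) (by simpa using h1) []
        have hk2 : p.1 ∈ (PySem.Dict.mk l2).keys := (PySem.Dict.contains_iff_mem_keys _ _).1 hc
        have : p.1 ∈ l2.map Prod.fst := by simpa [PySem.Dict.keys] using hk2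
        rcases List.mem_map.1 this with ⟨q, hq, hqk⟩
        have hget2 : (PySem.Dict.mk l2).getD p.1 [] = q.2 := by
          rw [← hqk]
          exact PySem.Dict.getD_of_mem_items (PySem.Dict.mk l2)
            (show (q.1, q.2) ∈ (PySem.Dict.mk l2).items from hq) (by simpa using h2) []
        have hv : p.2 = pvCanonNbrs q.2 := by
          rw [hpv, pvCanonNbrs_eq_iff]
          rw [hget1, hget2] at heq
          exact heq
        have hp2 : p = (q.1, pvCanonNbrs q.2) := by
          cases p; cases hqk; cases hv; rfl
        rw [hm2]
        exact hp2 ▸ List.mem_map_of_mem hq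
      have hnd1 : m1.Nodup := by
        have : (m1.map Prod.fst).Nodup := by
          simpa [hm1, List.map_map, Function.comp] using h1
        exact this.of_map
      have hlenm : m2.length ≤ m1.length := by simp [hm1, hm2, hlen]
      exact (List.subperm_of_subset hnd1 hsub).perm_of_length_le hlenm
    · -- Perm ⇒ every loop step succeeds
      intro hperm k hk
      rcases List.mem_map.1 hk with ⟨p, hp, rfl⟩
      have hmem1 : (p.1, pvCanonNbrs p.2) ∈ m1 := List.mem_map_of_mem hp
      have hmem2 : (p.1, pvCanonNbrs p.2) ∈ m2 := hperm.mem_iff.1 hmem1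
      rcases pvCanonNbrs_mem_map hmem2 with ⟨w, hw, hcw⟩
      have hget1 : (PySem.Dict.mk l1).getD p.1 [] = p.2 :=
        PySem.Dict.getD_of_mem_items (PySem.Dict.mk l1)
          (show (p.1, p.2) ∈ (PySem.Dict.mk l1).items from hp) (by simpa using h1) []
      have hget2 : (PySem.Dict.mk l2).getD p.1 [] = w :=
        PySem.Dict.getD_of_mem_items (PySem.Dict.mk l2)
          (show (p.1, w) ∈ (PySem.Dict.mk l2).items from hw) (by simpa using h2) []
      have hc : (PySem.Dict.mk l2).contains p.1 = true := by
        rw [PySem.Dict.contains_iff_mem_keys]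
        have : p.1 ∈ l2.map Prod.fst := List.mem_map.2 ⟨(p.1, w), hw, rfl⟩
        simpa [PySem.Dict.keys] using this
      have heq : PySem.Set.equal (PySem.Set.ofList p.2) (PySem.Set.ofList w) = true :=
        (pvCanonNbrs_eq_iff p.2 w).1 hcw
      simp [hc, hget1, hget2, heq]
  · -- lengths differ: A is false and the canonical lists cannot be equal
    rw [if_pos (by simpa using hlen)]
    constructor
    · intro h; cases h
    · intro h
      exfalso
      apply hlen
      have := congrArg List.length h
      simpa [pvCanon, PySem.List.length_sorted] using this
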